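-- pv_equiv track=rewrite | github.com/labianca/exp_refback | exp.py | parse_ref_back_block
-- ===== SOURCE A (Python) =====
-- def parse_ref_back_block(stream, ref_stream):
--     assert ref_stream[0]
--     current_in_mem = stream[0]
--     in_mem = [current_in_mem]
--     is_same = [False]
--
--     for st, ref in zip(stream[1:], ref_stream[1:]):
--         in_mem.append(current_in_mem)
--         is_same.append(current_in_mem == st)
--
--         if ref:
--             current_in_mem = st
--
--     return is_same, in_mem
-- ===== SOURCE B (Python) =====
-- def parse_ref_back_block(stream, ref_stream):
--     assert ref_stream[0]
--     n = min(len(stream), len(ref_stream))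
--     # flagged positions; each flagged index a holds stream[a] for positions a+1..b,
--     # where b is the next flagged index (or n-1 at the end).
--     trues = [j for j in range(n) if ref_stream[j]]
--     in_mem = [stream[0]]
--     for a, b in zip(trues, trues[1:] + [n - 1]):
--         in_mem += [stream[a]] * (b - a)
--     is_same = [False] + [in_mem[i] == stream[i] for i in range(1, n)]
--     return is_same, in_mem
-- ===== Notes on version B (the rewrite author's own statement) =====
-- stated objective: alternative
-- what changed: Replaces the element-by-element carry loop by an index-based segment algorithm: collect the flagged indices, expand each inter-flag segment with list replication to build in_mem, then derive is_same by an indexed comparison pass.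
-- outside the precondition, e.g. on parse_ref_back_block([], [True]): A raises IndexError, B raises IndexError; on parse_ref_back_block([1], [False]): A raises AssertionError, B raises AssertionError
import Mathlib
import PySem

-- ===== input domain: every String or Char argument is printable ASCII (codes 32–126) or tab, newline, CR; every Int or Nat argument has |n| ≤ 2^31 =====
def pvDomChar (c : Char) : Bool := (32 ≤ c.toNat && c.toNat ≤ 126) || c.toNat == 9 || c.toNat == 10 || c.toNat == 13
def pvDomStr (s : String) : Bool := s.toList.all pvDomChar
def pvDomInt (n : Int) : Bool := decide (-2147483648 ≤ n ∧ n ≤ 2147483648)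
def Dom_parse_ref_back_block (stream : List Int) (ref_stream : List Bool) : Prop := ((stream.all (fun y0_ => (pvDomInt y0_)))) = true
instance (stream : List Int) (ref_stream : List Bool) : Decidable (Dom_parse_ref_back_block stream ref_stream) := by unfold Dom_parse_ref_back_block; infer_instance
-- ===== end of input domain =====

-- B is an alternative algorithm of the same cost: instead of carrying the held value
-- element by element, it collects the flagged indices and expands each inter-flag
-- segment by list replication, then derives is_same by an indexed comparison pass.
-- Equivalence of the return values is proved on Pre_ (exactly the inputs A accepts).

-- ===== PORT A =====
-- single loop over zip(stream[1:], ref_stream[1:]) with state (current_in_mem, in_mem, is_same)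
def parse_ref_back_block (stream : List Int) (ref_stream : List Bool) : List Bool × List Int :=
  let current := (PySem.List.pyGet? stream 0).getD 0   -- stream[0]; Pre_ excludes the IndexError
  let res :=
    ((PySem.List.slice stream (some 1) none).zip (PySem.List.slice ref_stream (some 1) none)).foldl
      (fun (s : Int × List Int × List Bool) (p : Int × Bool) =>
        (if p.2 then p.1 else s.1, s.2.1 ++ [s.1], s.2.2 ++ [decide (s.1 = p.1)]))
      (current, [current], [false])
  (res.2.2, res.2.1)

-- ===== PORT B =====
-- collect flagged indices, expand segments by replication, then indexed comparison
def parse_ref_back_block_alt (stream : List Int) (ref_stream : List Bool) : List Bool × List Int :=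
  let n : Int := min (stream.length : Int) (ref_stream.length : Int)
  let trues : List Int :=
    (PySem.List.pyRange 0 n 1).filter (fun j => (PySem.List.pyGet? ref_stream j).getD false)
  let in_mem : List Int :=
    (trues.zip (PySem.List.slice trues (some 1) none ++ [n - 1])).foldl
      (fun acc p => acc ++ List.replicate (p.2 - p.1).toNat ((PySem.List.pyGet? stream p.1).getD 0))
      [(PySem.List.pyGet? stream 0).getD 0]   -- stream[0]; Pre_ excludes the IndexError
  let is_same : List Bool := false ::
    (PySem.List.pyRange 1 n 1).map (fun i =>
      decide ((PySem.List.pyGet? in_mem i).getD 0 = (PySem.List.pyGet? stream i).getD 0))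
  (is_same, in_mem)

-- ===== PRECONDITION & SPEC =====
-- Pre_ = exactly the inputs A returns on: stream[0] must exist (IndexError otherwise)
-- and ref_stream must start with True (assert / IndexError otherwise).
def Pre_parse_ref_back_block (stream : List Int) (ref_stream : List Bool) : Prop :=
  stream ≠ [] ∧ ref_stream.headD false = true
instance (stream : List Int) (ref_stream : List Bool) : Decidable (Pre_parse_ref_back_block stream ref_stream) := by unfold Pre_parse_ref_back_block; infer_instance
def pvWitness_parse_ref_back_block : List Int × List Bool := ([3, 5, 3], [true, false, true])

def Spec_parse_ref_back_block (stream : List Int) (ref_stream : List Bool) (out : List Bool × List Int) : Prop := out = parse_ref_back_block_alt stream ref_stream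
instance (stream : List Int) (ref_stream : List Bool) (out : List Bool × List Int) : Decidable (Spec_parse_ref_back_block stream ref_stream out) := by unfold Spec_parse_ref_back_block; infer_instance

-- ===== CLAIM (what is proved, stated in full; the proofs are below) =====
def Claim_equal_parse_ref_back_block : Prop := ∀ (stream : List Int) (ref_stream : List Bool), Dom_parse_ref_back_block stream ref_stream → Pre_parse_ref_back_block stream ref_stream → Spec_parse_ref_back_block stream ref_stream (parse_ref_back_block stream ref_stream)

-- ===== LEMMAS AND PROOFS =====

-- the sequence of held values: cell i = value held when position i is visited
def pvCells (cur : Int) : List (Int × Bool) → List Int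
  | [] => []
  | (st, ref) :: ps => cur :: pvCells (if ref then st else cur) ps

-- final held value after the whole walk
def pvFinal (cur : Int) : List (Int × Bool) → Int
  | [] => cur
  | (st, ref) :: ps => pvFinal (if ref then st else cur) ps

-- the is_same entries A produces
def pvSames (cur : Int) : List (Int × Bool) → List Bool
  | [] => []
  | (st, ref) :: ps => decide (cur = st) :: pvSames (if ref then st else cur) ps

-- absolute indices (starting at off) of the flagged pairs
def truesAbs (off : Int) : List (Int × Bool) → List Int
  | [] => []
  | (_, ref) :: ps => if ref then off :: truesAbs (off + 1) ps else truesAbs (off + 1) ps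

-- segment expansion: anchor a, remaining flagged indices ts, final boundary `last`
def segExpand (stream : List Int) (a : Int) : List Int → Int → List Int
  | [], last => List.replicate (last - a).toNat ((PySem.List.pyGet? stream a).getD 0)
  | b :: ts, last =>
      List.replicate (b - a).toNat ((PySem.List.pyGet? stream a).getD 0) ++ segExpand stream b ts last

lemma length_pvCells (ps : List (Int × Bool)) : ∀ cur, (pvCells cur ps).length = ps.length := by
  induction ps with
  | nil => intro cur; simp [pvCells]
  | cons p ps ih => intro cur; obtain ⟨st, ref⟩ := p; simp [pvCells, ih]

lemma foldA_eq (ps : List (Int × Bool)) : ∀ (cur : Int) (im : List Int) (iss : List Bool),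
    ps.foldl
      (fun (s : Int × List Int × List Bool) (p : Int × Bool) =>
        (if p.2 then p.1 else s.1, s.2.1 ++ [s.1], s.2.2 ++ [decide (s.1 = p.1)]))
      (cur, im, iss)
    = (pvFinal cur ps, im ++ pvCells cur ps, iss ++ pvSames cur ps) := by
  induction ps with
  | nil => intro cur im iss; simp [pvFinal, pvCells, pvSames]
  | cons p ps ih =>
    intro cur im iss
    obtain ⟨st, ref⟩ := p
    simp only [List.foldl_cons, ih, pvFinal, pvCells, pvSames, List.append_assoc,
      List.singleton_append]

-- comparing the cells against the stream elements they were compared with gives pvSames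
lemma sames_eq_zip_cells (s : List Int) : ∀ (r : List Bool) (cur : Int),
    ((pvCells cur (s.zip r)).zip s).map (fun p => decide (p.1 = p.2))
    = pvSames cur (s.zip r) := by
  induction s with
  | nil => intro r cur; simp [pvCells, pvSames]
  | cons x s ih =>
    intro r cur
    cases r with
    | nil => simp [pvCells, pvSames]
    | cons b r => simp [pvCells, pvSames, ih]

-- the filter over range(off, off+len) picks out exactly the flagged absolute indices
lemma filter_pyRange_eq_truesAbs (pred : Int → Bool) (ps : List (Int × Bool)) : ∀ (off : Int),
    (∀ (k : Nat) (hk : k < ps.length), pred (off + k) = (ps[k]).2) →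
    (PySem.List.pyRange off (off + ps.length) 1).filter pred = truesAbs off ps := by
  induction ps with
  | nil =>
    intro off _
    simp [PySem.List.pyRange_one_eq_nil, truesAbs]
  | cons p ps ih =>
    intro off h
    obtain ⟨st, ref⟩ := p
    have h0 : pred off = ref := by
      have := h 0 (by simp)
      simpa using this
    have hc : PySem.List.pyRange off (off + ((ps.length + 1 : Nat) : Int)) 1
        = off :: PySem.List.pyRange (off + 1) (off + ((ps.length + 1 : Nat) : Int)) 1 := by
      refine PySem.List.pyRange_one_cons ?_
      push_cast; omega
    have hb : off + ((ps.length + 1 : Nat) : Int) = (off + 1) + (ps.length : Int) := by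
      push_cast; ring
    have ihr := ih (off + 1) (by
      intro k hk
      have := h (k + 1) (by simpa using Nat.succ_lt_succ hk)
      calc pred (off + 1 + (k : Int)) = pred (off + ((k + 1 : Nat) : Int)) := by
            congr 1; push_cast; ring
        _ = (ps[k]).2 := by simpa using this)
    simp only [List.length_cons] at *
    rw [hc, List.filter_cons, h0, hb, ihr]
    cases ref <;> simp [truesAbs]

-- the zipped segment fold is segExpand
lemma foldSeg (stream : List Int) (ts : List Int) : ∀ (a last : Int) (acc : List Int),
    ((a :: ts).zip (ts ++ [last])).foldl
      (fun acc p => acc ++ List.replicate (p.2 - p.1).toNat ((PySem.List.pyGet? stream p.1).getD 0))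
      acc
    = acc ++ segExpand stream a ts last := by
  induction ts with
  | nil => intro a last acc; simp [segExpand]
  | cons b ts ih =>
    intro a last acc
    simp only [List.cons_append, List.zip_cons_cons, List.foldl_cons, ih, segExpand,
      List.append_assoc]

-- segment expansion from anchor a produces the pending replicate plus the held-value cells
lemma seg_eq_cells (stream : List Int) (q : List (Int × Bool)) : ∀ (off a cur : Int),
    a < off →
    (PySem.List.pyGet? stream a).getD 0 = cur →
    (∀ (k : Nat) (hk : k < q.length), (PySem.List.pyGet? stream (off + k)).getD 0 = (q[k]).1) →
    segExpand stream a (truesAbs off q) (off - 1 + q.length)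
    = List.replicate (off - 1 - a).toNat cur ++ pvCells cur q := by
  induction q with
  | nil =>
    intro off a cur ha hcur _
    simp only [List.length_nil, Nat.cast_zero, add_zero, truesAbs, segExpand, pvCells,
      List.append_nil, hcur]
  | cons p q ih =>
    intro off a cur ha hcur h
    obtain ⟨st, ref⟩ := p
    have hst : (PySem.List.pyGet? stream off).getD 0 = st := by
      have := h 0 (by simp); simpa using this
    have hshift : ∀ (k : Nat) (hk : k < q.length),
        (PySem.List.pyGet? stream (off + 1 + k)).getD 0 = (q[k]).1 := by
      intro k hk
      have := h (k + 1) (by simpa using Nat.succ_lt_succ hk)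
      calc (PySem.List.pyGet? stream (off + 1 + (k : Int))).getD 0
          = (PySem.List.pyGet? stream (off + ((k + 1 : Nat) : Int))).getD 0 := by
            congr 2; push_cast; ring
        _ = (q[k]).1 := by simpa using this
    have hlast : off - 1 + (((q.length + 1 : Nat)) : Int) = (off + 1) - 1 + (q.length : Int) := by
      push_cast; ring
    have hrep : (off - a).toNat = (off - 1 - a).toNat + 1 := by omega
    cases ref with
    | true =>
      have ihh := ih (off + 1) off st (by omega) hst hshift
      have ht : truesAbs off ((st, true) :: q) = off :: truesAbs (off + 1) q := by
        simp [truesAbs]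
      have hz : ((off + 1) - 1 - off).toNat = 0 := by omega
      have hcl : pvCells cur ((st, true) :: q) = cur :: pvCells st q := by simp [pvCells]
      rw [ht, List.length_cons, hlast, segExpand, hcur, ihh, hz, hcl]
      rw [List.replicate_zero, List.nil_append, hrep, List.replicate_succ',
        List.append_assoc, List.singleton_append]
    | false =>
      have ihh := ih (off + 1) a cur (by omega) hcur hshift
      have hf : truesAbs off ((st, false) :: q) = truesAbs (off + 1) q := by
        simp [truesAbs]
      have hs1 : ((off + 1) - 1 - a).toNat = (off - 1 - a).toNat + 1 := by omega
      have hcl : pvCells cur ((st, false) :: q) = cur :: pvCells cur q := by simp [pvCells]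
      rw [hf, List.length_cons, hlast, ihh, hs1, hcl, List.replicate_succ',
        List.append_assoc, List.singleton_append]

-- indexed comparison over range(len u) equals the zip comparison (u at most as long as v)
lemma range_getD_zip (u : List Int) : ∀ (v : List Int), u.length ≤ v.length →
    (List.range u.length).map (fun k => decide (u.getD k 0 = v.getD k 0))
    = (u.zip v).map (fun p => decide (p.1 = p.2)) := by
  induction u with
  | nil => intro v _; simp
  | cons x u ih =>
    intro v hv
    cases v with
    | nil => simp at hv
    | cons y v =>
      have htail : (List.range u.length).map
            ((fun k => decide ((x :: u).getD k 0 = (y :: v).getD k 0)) ∘ Nat.succ)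
          = (List.range u.length).map (fun k => decide (u.getD k 0 = v.getD k 0)) := by
        apply List.map_congr_left
        intro k _
        simp
      simp only [List.length_cons, List.range_succ_eq_map, List.map_cons, List.map_map,
        List.zip_cons_cons]
      rw [htail, ih v (by simpa using hv)]
      simp

-- ===== VERDICT (by name: the statement is the Claim_ definition above) =====
theorem parse_ref_back_block_spec : Claim_equal_parse_ref_back_block := by
  intro stream ref_stream _hDom hPre
  obtain ⟨hs, hr⟩ := hPre
  obtain ⟨s0, s, rfl⟩ : ∃ s0 s, stream = s0 :: s := by
    cases stream with
    | nil => exact absurd rfl hs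
    | cons a l => exact ⟨a, l, rfl⟩
  obtain ⟨r, rfl⟩ : ∃ r, ref_stream = true :: r := by
    cases ref_stream with
    | nil => simp at hr
    | cons b l => cases b with
      | false => simp at hr
      | true => exact ⟨l, rfl⟩
  unfold Spec_parse_ref_back_block parse_ref_back_block parse_ref_back_block_alt
  -- abbreviations
  set ps := s.zip r with hps
  have hm : ps.length = min s.length r.length := by simp [hps]
  -- n = 1 + |ps|
  have hn : min (((s0 :: s).length : Int)) (((true :: r).length : Int)) = 1 + (ps.length : Int) := by
    simp only [List.length_cons, hm]
    push_cast
    omega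
  simp only [hn, PySem.List.slice_from_one, PySem.List.pyGet?_zero_cons, Option.getD_some,
    List.tail_cons, List.zip_cons_cons, List.foldl_cons]
  rw [foldA_eq]
  -- trues = 0 :: truesAbs 1 ps
  have htrues : (PySem.List.pyRange 0 (1 + (ps.length : Int)) 1).filter
      (fun j => (PySem.List.pyGet? (true :: r) j).getD false) = 0 :: truesAbs 1 ps := by
    have hc : PySem.List.pyRange 0 (1 + (ps.length : Int)) 1
        = 0 :: PySem.List.pyRange 1 (1 + (ps.length : Int)) 1 := by
      refine PySem.List.pyRange_one_cons ?_
      have : (0:Int) ≤ (ps.length : Int) := by positivity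
      omega
    have hb : (1 : Int) + (ps.length : Int) = 1 + (ps.length : Int) := rfl
    rw [hc, List.filter_cons]
    have h0 : (PySem.List.pyGet? (true :: r) 0).getD false = true := by
      simp
    rw [h0]
    have := filter_pyRange_eq_truesAbs
      (fun j => (PySem.List.pyGet? (true :: r) j).getD false) ps 1 (by
        intro k hk
        have hk2 : k < r.length := by
          have := hm; omega
        calc (PySem.List.pyGet? (true :: r) (1 + (k : Int))).getD false
            = (PySem.List.pyGet? (true :: r) ((k : Int) + 1)).getD false := by ring_nf
          _ = (PySem.List.pyGet? r (k : Int)).getD false := by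
              rw [PySem.List.pyGet?_cons_succ]
          _ = r[k] := by
              rw [PySem.List.pyGet?_natCast]
              simp [List.getElem?_eq_getElem hk2]
          _ = (ps[k]).2 := by
              simp [hps])
    rw [this]
    simp
  rw [htrues]
  simp only [List.tail_cons]
  -- in_mem = s0 :: pvCells s0 ps
  have hmem : ((0 :: truesAbs 1 ps).zip
        (truesAbs 1 ps ++ [1 + (ps.length : Int) - 1])).foldl
      (fun acc p => acc ++ List.replicate (p.2 - p.1).toNat
        ((PySem.List.pyGet? (s0 :: s) p.1).getD 0)) [s0]
      = s0 :: pvCells s0 ps := by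
    rw [foldSeg]
    have hseg := seg_eq_cells (s0 :: s) ps 1 0 s0 (by omega)
      (by simp)
      (by
        intro k hk
        have hk2 : k < s.length := by
          have := hm; omega
        calc (PySem.List.pyGet? (s0 :: s) (1 + (k : Int))).getD 0
            = (PySem.List.pyGet? (s0 :: s) ((k : Int) + 1)).getD 0 := by ring_nf
          _ = (PySem.List.pyGet? s (k : Int)).getD 0 := by rw [PySem.List.pyGet?_cons_succ]
          _ = s[k] := by
              rw [PySem.List.pyGet?_natCast]
              simp [List.getElem?_eq_getElem hk2]
          _ = (ps[k]).1 := by simp [hps])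
    have h1 : (1 : Int) + (ps.length : Int) - 1 = 1 - 1 + (ps.length : Int) := by ring
    rw [h1, hseg]
    simp
  simp only [hmem]
  -- is_same
  have hsame : (PySem.List.pyRange 1 (1 + (ps.length : Int)) 1).map (fun i =>
        decide ((PySem.List.pyGet? (s0 :: pvCells s0 ps) i).getD 0
          = (PySem.List.pyGet? (s0 :: s) i).getD 0))
      = pvSames s0 ps := by
    have hrange : PySem.List.pyRange 1 (1 + (ps.length : Int)) 1
        = (List.range ps.length).map (fun k => ((k + 1 : Nat) : Int)) := by
      rw [PySem.List.pyRange_one]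
      have : ((1 : Int) + (ps.length : Int) - 1).toNat = ps.length := by omega
      rw [this]
      apply List.map_congr_left
      intro k _
      push_cast; ring
    rw [hrange, List.map_map]
    have hpt : ∀ k : Nat,
        (decide ((PySem.List.pyGet? (s0 :: pvCells s0 ps) ((k + 1 : Nat) : Int)).getD 0
          = (PySem.List.pyGet? (s0 :: s) ((k + 1 : Nat) : Int)).getD 0))
        = decide ((pvCells s0 ps).getD k 0 = s.getD k 0) := by
      intro k
      rw [PySem.List.pyGet?_natCast, PySem.List.pyGet?_natCast]
      simp [List.getD]
    calc (List.range ps.length).map (fun k =>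
          decide ((PySem.List.pyGet? (s0 :: pvCells s0 ps) ((k + 1 : Nat) : Int)).getD 0
            = (PySem.List.pyGet? (s0 :: s) ((k + 1 : Nat) : Int)).getD 0))
        = (List.range ps.length).map (fun k => decide ((pvCells s0 ps).getD k 0 = s.getD k 0)) := by
          apply List.map_congr_left; intro k _; exact hpt k
      _ = (List.range (pvCells s0 ps).length).map
            (fun k => decide ((pvCells s0 ps).getD k 0 = s.getD k 0)) := by
          rw [length_pvCells]
      _ = ((pvCells s0 ps).zip s).map (fun p => decide (p.1 = p.2)) := by
          apply range_getD_zip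
          rw [length_pvCells]
          have := hm; omega
      _ = pvSames s0 ps := by rw [hps, sames_eq_zip_cells]
  rw [hsame]
  simp [← hps]
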